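-- pv_equiv track=rewrite | github.com/mrittman/citationMetrics | metricCalculator/metrics.py | citationScore
-- ===== SOURCE A (Python) =====
-- def citationScore(cites):
--     ''' score citations on a graduated scale, roughly logarithmic
--
--     used by the MR1 metric '''
--
--     scores = []
--     for c in cites:
--         if c==0:
--             scores.append(0)
--
--         elif c<=5:
--             scores.append(1)
--
--         elif c<=10:
--             scores.append(2)
--
--         elif c<=20:
--             scores.append(3)
--
--         elif c<=40:
--             scores.append(4)
--
--         elif c<=80:
--             scores.append(5)
--
--         else:
--             scores.append(6)
--
--     return scores
-- ===== SOURCE B (Python) =====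
-- def _score(c, threshold=5, s=1):
--     '''score by doubling the threshold: the ladder 5,10,20,40,80 is geometric'''
--     if c <= threshold or s >= 6:
--         return s
--     return _score(c, threshold * 2, s + 1)
--
-- def citationScore(cites):
--     ''' score citations on a graduated scale, roughly logarithmic '''
--     return [0 if c == 0 else _score(c) for c in cites]
-- ===== Notes on version B (the rewrite author's own statement) =====
-- stated objective: alternative
-- what changed: replaces the six-branch if/elif chain with a recursive helper that rebuilds the geometric ladder by doubling a threshold starting at 5 (capped at score 6), so no fixed cutoff list or branch chain appears at all.
import Mathlib
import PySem

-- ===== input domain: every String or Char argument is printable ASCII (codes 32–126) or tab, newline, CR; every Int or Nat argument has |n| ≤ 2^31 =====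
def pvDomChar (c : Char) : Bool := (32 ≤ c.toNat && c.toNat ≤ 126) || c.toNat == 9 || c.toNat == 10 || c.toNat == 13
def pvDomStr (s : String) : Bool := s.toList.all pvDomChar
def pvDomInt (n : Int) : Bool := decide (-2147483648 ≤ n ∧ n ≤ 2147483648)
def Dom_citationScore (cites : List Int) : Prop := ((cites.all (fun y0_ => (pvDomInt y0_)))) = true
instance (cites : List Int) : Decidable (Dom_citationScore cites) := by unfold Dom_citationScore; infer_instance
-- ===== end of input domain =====

-- B: alternative — a recursive threshold-doubling helper (start 5, double, cap at 6) replaces the six-branch if/elif accumulator loop; same cost.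


-- ===== PORT A =====
def citationScore (cites : List Int) : List Int :=
  cites.foldl (fun scores c =>
    if c == 0 then scores ++ [0]
    else if c ≤ 5 then scores ++ [1]
    else if c ≤ 10 then scores ++ [2]
    else if c ≤ 20 then scores ++ [3]
    else if c ≤ 40 then scores ++ [4]
    else if c ≤ 80 then scores ++ [5]
    else scores ++ [6]) []

-- ===== PORT B =====
-- recursive doubling helper (_score in Source B); terminates because s increases toward 6
def pvScore (c threshold s : Int) : Int :=
  if c ≤ threshold ∨ 6 ≤ s then s
  else pvScore c (threshold * 2) (s + 1)
termination_by (6 - s).toNat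
decreasing_by omega

def citationScore_alt (cites : List Int) : List Int :=
  cites.map (fun c => if c == 0 then 0 else pvScore c 5 1)

-- ===== PRECONDITION & SPEC =====
def Spec_citationScore (cites : List Int) (out : List Int) : Prop := out = citationScore_alt cites
instance (cites : List Int) (out : List Int) : Decidable (Spec_citationScore cites out) := by unfold Spec_citationScore; infer_instance

-- ===== CLAIM (what is proved, stated in full; the proofs are below) =====
def Claim_equal_citationScore : Prop := ∀ (cites : List Int), Dom_citationScore cites → Spec_citationScore cites (citationScore cites)

-- ===== LEMMAS AND PROOFS =====
-- score function A's if/elif chain computes per element (proof-side helper)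
def scoreA (c : Int) : Int :=
  if c == 0 then 0 else if c ≤ 5 then 1 else if c ≤ 10 then 2 else if c ≤ 20 then 3
  else if c ≤ 40 then 4 else if c ≤ 80 then 5 else 6

lemma stepA_eq (scores : List Int) (c : Int) :
    (if c == 0 then scores ++ [0]
     else if c ≤ 5 then scores ++ [1]
     else if c ≤ 10 then scores ++ [2]
     else if c ≤ 20 then scores ++ [3]
     else if c ≤ 40 then scores ++ [4]
     else if c ≤ 80 then scores ++ [5]
     else scores ++ [6]) = scores ++ [scoreA c] := by
  unfold scoreA; split_ifs <;> rfl

lemma citationScore_eq_map (cites : List Int) : citationScore cites = cites.map scoreA := by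
  unfold citationScore
  have h : (fun (scores : List Int) (c : Int) =>
      if c == 0 then scores ++ [0]
      else if c ≤ 5 then scores ++ [1]
      else if c ≤ 10 then scores ++ [2]
      else if c ≤ 20 then scores ++ [3]
      else if c ≤ 40 then scores ++ [4]
      else if c ≤ 80 then scores ++ [5]
      else scores ++ [6]) = fun scores c => scores ++ [scoreA c] := by
    funext scores c; exact stepA_eq scores c
  rw [h, PySem.List.foldl_append_singleton_eq_map]
  simp

lemma pvScore_stop (c threshold s : Int) (h : c ≤ threshold ∨ 6 ≤ s) :
    pvScore c threshold s = s := by rw [pvScore]; exact if_pos h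

lemma pvScore_step (c threshold s : Int) (h : ¬ (c ≤ threshold ∨ 6 ≤ s)) :
    pvScore c threshold s = pvScore c (threshold * 2) (s + 1) := by
  rw [pvScore]; exact if_neg h

-- per-element agreement of the two scoring rules
lemma score_eq (c : Int) : scoreA c = (if c == 0 then 0 else pvScore c 5 1) := by
  unfold scoreA
  by_cases h0 : c = 0
  · simp [h0]
  by_cases h5 : c ≤ 5
  · rw [if_neg (by simpa using h0), if_pos h5, pvScore_stop _ _ _ (Or.inl h5)]; simp [h0]
  rw [if_neg (by simpa using h0), if_neg h5, pvScore_step _ _ _ (by omega)]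
  by_cases h10 : c ≤ 10
  · rw [if_pos h10, pvScore_stop _ _ _ (by norm_num; omega)]; simp [h0]
  rw [if_neg h10, pvScore_step _ _ _ (by norm_num; omega)]
  by_cases h20 : c ≤ 20
  · rw [if_pos h20, pvScore_stop _ _ _ (by norm_num; omega)]; simp [h0]
  rw [if_neg h20, pvScore_step _ _ _ (by norm_num; omega)]
  by_cases h40 : c ≤ 40
  · rw [if_pos h40, pvScore_stop _ _ _ (by norm_num; omega)]; simp [h0]
  rw [if_neg h40, pvScore_step _ _ _ (by norm_num; omega)]
  by_cases h80 : c ≤ 80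
  · rw [if_pos h80, pvScore_stop _ _ _ (by norm_num; omega)]; simp [h0]
  rw [if_neg h80, pvScore_step _ _ _ (by norm_num; omega)]
  rw [pvScore_stop _ _ _ (by norm_num)]; simp [h0]

-- ===== VERDICT (by name: the statement is the Claim_ definition above) =====
theorem citationScore_spec : Claim_equal_citationScore := by
  intro cites _
  unfold Spec_citationScore citationScore_alt
  rw [citationScore_eq_map]
  exact List.map_congr_left (fun a _ => score_eq a)
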